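-- pv_equiv track=rewrite | github.com/gxrdon/bwt_var | fmmap.py | create_cigar
-- ===== SOURCE A (Python) =====
-- def create_cigar(seq):
--     ins_count = 0
--     del_count = 0
--     match_count = 0
--     count = 0
--     cigar = ""
--
--     for i in range(0, len(seq)):
--         count += 1
--         if seq[i] == '+':
--             ins_count += 1
--             if del_count != 0:
--                 cigar += str(del_count) + "D"
--                 del_count = 0
--             elif match_count != 0:
--                 cigar += str(match_count) + "M"
--                 match_count = 0
--         elif seq[i] == '-':
--             del_count += 1
--             if ins_count != 0:
--                 cigar += str(ins_count) + "I"
--                 ins_count = 0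
--             elif match_count != 0:
--                 cigar += str(match_count) + "M"
--                 match_count = 0
--         else:
--             match_count += 1
--             if del_count != 0:
--                 cigar += str(del_count) + "D"
--                 del_count = 0
--             elif ins_count != 0:
--                 cigar += str(ins_count) + "I"
--                 ins_count = 0
--
--     if del_count != 0:
--         cigar += str(del_count) + "D"
--     if ins_count != 0:
--         cigar += str(ins_count) + "I"
--     if match_count != 0:
--         cigar += str(match_count) + "M"
--
--     return cigar
-- ===== SOURCE B (Python) =====
-- def _cigar_letter(c):
--     if c == '+':
--         return 'I'
--     if c == '-':
--         return 'D'
--     return 'M'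
--
--
-- def create_cigar(seq):
--     letters = [_cigar_letter(c) for c in seq]
--     parts = []
--     i = 0
--     n = len(letters)
--     while i < n:
--         j = i
--         while j < n and letters[j] == letters[i]:
--             j += 1
--         parts.append(str(j - i) + letters[i])
--         i = j
--     return "".join(parts)
-- ===== Notes on version B (the rewrite author's own statement) =====
-- stated objective: idiomatic
-- what changed: Replaces A's three-counter flushing state machine (with its mirrored if/elif flush logic in every branch and a trailing triple flush) by a map-to-letters pass followed by a run-length grouping scan that emits one count+letter piece per run and joins them.
import Mathlib
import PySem

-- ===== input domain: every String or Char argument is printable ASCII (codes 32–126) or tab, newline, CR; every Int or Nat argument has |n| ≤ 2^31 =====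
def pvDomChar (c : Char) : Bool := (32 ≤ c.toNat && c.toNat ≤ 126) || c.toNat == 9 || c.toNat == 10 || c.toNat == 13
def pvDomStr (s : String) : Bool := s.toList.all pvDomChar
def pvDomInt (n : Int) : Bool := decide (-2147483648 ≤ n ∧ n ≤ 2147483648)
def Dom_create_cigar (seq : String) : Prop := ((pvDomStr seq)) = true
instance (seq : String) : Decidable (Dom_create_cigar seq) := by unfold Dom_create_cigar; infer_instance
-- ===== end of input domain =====

-- B replaces A's three-counter flushing state machine by a map-to-CIGAR-letters pass
-- followed by a run-length grouping scan (same result, same cost; objective: idiomatic).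

-- ===== PORT A =====
-- loop state = (ins_count, del_count, match_count, count, cigar); the cigar string is kept as List Char
def aStep (st : Int × Int × Int × Int × List Char) (c : Char) : Int × Int × Int × Int × List Char :=
  let (ins, del, mat, cnt, cig) := st
  let cnt := cnt + 1
  if c = '+' then
    if del ≠ 0 then (ins + 1, 0, mat, cnt, cig ++ PySem.Int.toChars del ++ ['D'])
    else if mat ≠ 0 then (ins + 1, del, 0, cnt, cig ++ PySem.Int.toChars mat ++ ['M'])
    else (ins + 1, del, mat, cnt, cig)
  else if c = '-' then
    if ins ≠ 0 then (0, del + 1, mat, cnt, cig ++ PySem.Int.toChars ins ++ ['I'])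
    else if mat ≠ 0 then (ins, del + 1, 0, cnt, cig ++ PySem.Int.toChars mat ++ ['M'])
    else (ins, del + 1, mat, cnt, cig)
  else
    if del ≠ 0 then (ins, 0, mat + 1, cnt, cig ++ PySem.Int.toChars del ++ ['D'])
    else if ins ≠ 0 then (0, del, mat + 1, cnt, cig ++ PySem.Int.toChars ins ++ ['I'])
    else (ins, del, mat + 1, cnt, cig)

-- the three trailing flushes after A's loop
def aFinish (st : Int × Int × Int × Int × List Char) : List Char :=
  let (ins, del, mat, _, cig) := st
  let cig := if del ≠ 0 then cig ++ PySem.Int.toChars del ++ ['D'] else cig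
  let cig := if ins ≠ 0 then cig ++ PySem.Int.toChars ins ++ ['I'] else cig
  if mat ≠ 0 then cig ++ PySem.Int.toChars mat ++ ['M'] else cig

def create_cigar (seq : String) : String :=
  String.ofList (aFinish (seq.toList.foldl aStep (0, 0, 0, 0, [])))

-- ===== PORT B =====
def cigarLetter (c : Char) : Char :=
  if c = '+' then 'I' else if c = '-' then 'D' else 'M'

-- the two-pointer run scanner of Source B: the inner while is takeWhile/dropWhile from position i
def bGroups : List Char → List (Char × Nat)
  | [] => []
  | c :: rest =>
      (c, (rest.takeWhile (· = c)).length + 1) :: bGroups (rest.dropWhile (· = c))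
  termination_by l => l.length
  decreasing_by exact Nat.lt_succ_of_le (List.length_dropWhile_le _ _)

-- str(j - i) + letters[i]
def emitRun (g : Char × Nat) : List Char :=
  PySem.Int.toChars (g.2 : Int) ++ [g.1]

def create_cigar_alt (seq : String) : String :=
  String.ofList (PySem.Chars.join [] ((bGroups (seq.toList.map cigarLetter)).map emitRun))

-- ===== PRECONDITION & SPEC =====
def Spec_create_cigar (seq : String) (out : String) : Prop := out = create_cigar_alt seq
instance (seq : String) (out : String) : Decidable (Spec_create_cigar seq out) := by unfold Spec_create_cigar; infer_instance

-- ===== CLAIM (what is proved, stated in full; the proofs are below) =====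
def Claim_equal_create_cigar : Prop := ∀ (seq : String), Dom_create_cigar seq → Spec_create_cigar seq (create_cigar seq)

-- ===== LEMMAS AND PROOFS =====

theorem join_nil_cons (p : List Char) (ps : List (List Char)) :
    PySem.Chars.join [] (p :: ps) = p ++ PySem.Chars.join [] ps := by
  cases ps <;> simp [pysem, PySem.Chars.join_singleton, PySem.Chars.join_cons_cons]

-- A's step depends on the char only through its CIGAR letter
def lStep (st : Int × Int × Int × Int × List Char) (c : Char) : Int × Int × Int × Int × List Char :=
  let (ins, del, mat, cnt, cig) := st
  let cnt := cnt + 1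
  if c = 'I' then
    if del ≠ 0 then (ins + 1, 0, mat, cnt, cig ++ PySem.Int.toChars del ++ ['D'])
    else if mat ≠ 0 then (ins + 1, del, 0, cnt, cig ++ PySem.Int.toChars mat ++ ['M'])
    else (ins + 1, del, mat, cnt, cig)
  else if c = 'D' then
    if ins ≠ 0 then (0, del + 1, mat, cnt, cig ++ PySem.Int.toChars ins ++ ['I'])
    else if mat ≠ 0 then (ins, del + 1, 0, cnt, cig ++ PySem.Int.toChars mat ++ ['M'])
    else (ins, del + 1, mat, cnt, cig)
  else
    if del ≠ 0 then (ins, 0, mat + 1, cnt, cig ++ PySem.Int.toChars del ++ ['D'])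
    else if ins ≠ 0 then (0, del, mat + 1, cnt, cig ++ PySem.Int.toChars ins ++ ['I'])
    else (ins, del, mat + 1, cnt, cig)

theorem aStep_eq_lStep (st : Int × Int × Int × Int × List Char) (c : Char) :
    aStep st c = lStep st (cigarLetter c) := by
  obtain ⟨i, d, m, n, g⟩ := st
  by_cases h1 : c = '+'
  · simp [aStep, lStep, cigarLetter, h1]
  · by_cases h2 : c = '-'
    · simp [aStep, lStep, cigarLetter, h2]
    · simp [aStep, lStep, cigarLetter, h1, h2]

-- the state A's loop is in while inside a run of letter c of current length n
def stFor (c : Char) (n : Nat) (cnt : Int) (cig : List Char) : Int × Int × Int × Int × List Char :=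
  if c = 'I' then ((n : Int), 0, 0, cnt, cig)
  else if c = 'D' then (0, (n : Int), 0, cnt, cig)
  else (0, 0, (n : Int), cnt, cig)

def isLetter (c : Char) : Prop := c = 'I' ∨ c = 'D' ∨ c = 'M'

theorem cigarLetter_isLetter (c : Char) : isLetter (cigarLetter c) := by
  unfold cigarLetter isLetter
  split_ifs <;> simp

theorem lStep_same (c : Char) (hc : isLetter c) (n : Nat) (cnt : Int) (cig : List Char) :
    lStep (stFor c n cnt cig) c = stFor c (n + 1) (cnt + 1) cig := by
  rcases hc with h | h | h <;> subst h <;> simp [lStep, stFor]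

theorem lStep_diff (c x : Char) (hc : isLetter c) (hx : isLetter x) (hne : x ≠ c)
    (n : Nat) (hn : 0 < n) (cnt : Int) (cig : List Char) :
    lStep (stFor c n cnt cig) x =
      stFor x 1 (cnt + 1) (cig ++ PySem.Int.toChars (n : Int) ++ [c]) := by
  have hn' : (n : Int) ≠ 0 := by exact_mod_cast hn.ne'
  rcases hc with h | h | h <;> subst h <;>
    rcases hx with h' | h' | h' <;> subst h' <;>
    simp_all [lStep, stFor]

theorem lStep_init (x : Char) (hx : isLetter x) :
    lStep (0, 0, 0, 0, []) x = stFor x 1 1 [] := by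
  rcases hx with h | h | h <;> subst h <;> simp [lStep, stFor]

theorem aFinish_stFor (c : Char) (hc : isLetter c) (n : Nat) (hn : 0 < n)
    (cnt : Int) (cig : List Char) :
    aFinish (stFor c n cnt cig) = cig ++ PySem.Int.toChars (n : Int) ++ [c] := by
  have hnn : n ≠ 0 := hn.ne'
  rcases hc with h | h | h <;> subst h <;> simp [aFinish, stFor, hnn]

theorem main_loop (ℓ : List Char) (hℓ : ∀ x ∈ ℓ, isLetter x) :
    ∀ (c : Char), isLetter c → ∀ (n : Nat), 0 < n → ∀ (cnt : Int) (cig : List Char),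
      aFinish (ℓ.foldl lStep (stFor c n cnt cig)) =
        cig ++ PySem.Int.toChars ((n + (ℓ.takeWhile (· = c)).length : Nat) : Int) ++ [c] ++
          PySem.Chars.join [] ((bGroups (ℓ.dropWhile (· = c))).map emitRun) := by
  induction ℓ with
  | nil =>
      intro c hc n hn cnt cig
      simp [aFinish_stFor c hc n hn, bGroups, pysem]
  | cons x t ih =>
      intro c hc n hn cnt cig
      have hx : isLetter x := hℓ x (by simp)
      have ht : ∀ y ∈ t, isLetter y := fun y hy => hℓ y (by simp [hy])
      by_cases hxc : x = c
      · subst hxc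
        rw [List.foldl_cons, lStep_same x hx n cnt cig,
          ih ht x hx (n + 1) (Nat.succ_pos n) (cnt + 1) cig]
        have htw : (x :: t).takeWhile (· = x) = x :: t.takeWhile (· = x) := by
          simp
        have hdw : (x :: t).dropWhile (· = x) = t.dropWhile (· = x) := by
          simp
        rw [htw, hdw]
        simp [Nat.add_comm, Nat.add_assoc]
      · rw [List.foldl_cons, lStep_diff c x hc hx hxc n hn cnt cig,
          ih ht x hx 1 Nat.one_pos (cnt + 1) (cig ++ PySem.Int.toChars (n : Int) ++ [c])]
        have htw : (x :: t).takeWhile (· = c) = [] := by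
          simp [hxc]
        have hdw : (x :: t).dropWhile (· = c) = x :: t := by
          simp [hxc]
        rw [htw, hdw, bGroups, List.map_cons, join_nil_cons]
        simp [emitRun, Nat.add_comm]

-- ===== VERDICT (by name: the statement is the Claim_ definition above) =====
theorem create_cigar_spec : Claim_equal_create_cigar := by
  intro seq _
  unfold Spec_create_cigar create_cigar create_cigar_alt
  have hmap : seq.toList.foldl aStep (0, 0, 0, 0, []) =
      (seq.toList.map cigarLetter).foldl lStep (0, 0, 0, 0, []) := by
    rw [List.foldl_map]
    have hfun : aStep = fun st c => lStep st (cigarLetter c) := by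
      funext st c; exact aStep_eq_lStep st c
    rw [hfun]
  rw [hmap]
  have hℓ : ∀ x ∈ seq.toList.map cigarLetter, isLetter x := by
    intro x hx
    rcases List.mem_map.mp hx with ⟨y, _, rfl⟩
    exact cigarLetter_isLetter y
  cases hcase : seq.toList.map cigarLetter with
  | nil => simp [aFinish, bGroups, pysem]
  | cons x t =>
      rw [hcase] at hℓ
      have hx : isLetter x := hℓ x (by simp)
      have ht : ∀ y ∈ t, isLetter y := fun y hy => hℓ y (by simp [hy])
      rw [List.foldl_cons, lStep_init x hx,
        main_loop t ht x hx 1 Nat.one_pos 1 [],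
        bGroups, List.map_cons, join_nil_cons]
      simp [emitRun, Nat.add_comm]
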